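-- pv_equiv track=rewrite | github.com/MichalOsadowski/ai-training | dockerfile_generator/agents/refinement.py | _clean_dockerfile
-- ===== SOURCE A (Python) =====
-- def _clean_dockerfile(dockerfile: str) -> str:
--     """Clean and validate Dockerfile content."""
--
--     if not dockerfile:
--         return ""
--
--     lines = dockerfile.split('\n')
--     cleaned_lines = []
--
--     for line in lines:
--         line = line.strip()
--         # Skip empty lines at the beginning
--         if not cleaned_lines and not line:
--             continue
--         # Keep the line
--         cleaned_lines.append(line)
--
--     # Ensure it starts with FROM
--     if cleaned_lines and not cleaned_lines[0].startswith('FROM'):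
--         # Find the first FROM instruction
--         for i, line in enumerate(cleaned_lines):
--             if line.startswith('FROM'):
--                 cleaned_lines = cleaned_lines[i:]
--                 break
--
--     return '\n'.join(cleaned_lines)
-- ===== SOURCE B (Python) =====
-- def _clean_dockerfile(dockerfile: str) -> str:
--     """Clean and validate Dockerfile content."""
--     if not dockerfile:
--         return ""
--     lines = [line.strip() for line in dockerfile.split('\n')]
--     from_idx = next((i for i, l in enumerate(lines) if l.startswith('FROM')), None)
--     if from_idx is not None:
--         return '\n'.join(lines[from_idx:])
--     start = next((i for i, l in enumerate(lines) if l), len(lines))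
--     return '\n'.join(lines[start:])
-- ===== Notes on version B (the rewrite author's own statement) =====
-- stated objective: simpler
-- what changed: Replaces A's incremental accumulator loop (skip-leading-blanks while building, then a second indexed scan that re-slices the built list) with a direct decomposition: strip all lines once, locate the first FROM line (else the first non-empty line) by index, and slice-and-join from there.
import Mathlib
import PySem

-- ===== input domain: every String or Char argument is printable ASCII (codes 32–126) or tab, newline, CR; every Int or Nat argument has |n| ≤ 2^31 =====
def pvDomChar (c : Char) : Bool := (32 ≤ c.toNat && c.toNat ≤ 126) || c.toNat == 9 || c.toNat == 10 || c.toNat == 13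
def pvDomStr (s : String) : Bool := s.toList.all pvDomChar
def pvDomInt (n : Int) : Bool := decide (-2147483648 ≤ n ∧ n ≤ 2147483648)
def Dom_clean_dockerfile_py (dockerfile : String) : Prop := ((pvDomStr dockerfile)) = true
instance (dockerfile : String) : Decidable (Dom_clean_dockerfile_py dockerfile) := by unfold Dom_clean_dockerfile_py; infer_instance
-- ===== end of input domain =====

-- B replaces A's accumulator loop + second indexed re-slice scan with an index-and-slice decomposition (objective: simpler).

-- ===== PORT A =====
-- the 'for line in lines' accumulator loop of A
def pvStripLoop (lines : List String) : List String :=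
  lines.foldl (fun acc line =>
    let l := PySem.Str.strip line
    if acc = [] ∧ l = "" then acc else acc ++ [l]) []

-- A's 'for i, line in enumerate(cleaned): if line.startswith("FROM"): cleaned = cleaned[i:]; break'
def pvFindFrom (full : List String) : List String → Nat → List String
  | [], _ => full
  | l :: rest, i =>
    if PySem.Str.startswith l "FROM" then full.drop i else pvFindFrom full rest (i + 1)

def clean_dockerfile_py (dockerfile : String) : String :=
  if dockerfile = "" then ""
  else
    let lines := (PySem.Str.split? dockerfile "\n").getD []
    let cleaned := pvStripLoop lines
    let cleaned :=
      if cleaned ≠ [] ∧ ¬ (PySem.Str.startswith (cleaned.headD "") "FROM" = true) then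
        pvFindFrom cleaned cleaned 0
      else cleaned
    PySem.Str.join "\n" cleaned

-- ===== PORT B =====
def clean_dockerfile_py_alt (dockerfile : String) : String :=
  if dockerfile = "" then ""
  else
    let lines := ((PySem.Str.split? dockerfile "\n").getD []).map PySem.Str.strip
    match lines.findIdx? (fun l => PySem.Str.startswith l "FROM") with
    | some i => PySem.Str.join "\n" (lines.drop i)
    | none =>
      let start := (lines.findIdx? (fun l => !(l == ""))).getD lines.length
      PySem.Str.join "\n" (lines.drop start)

-- ===== PRECONDITION & SPEC =====
def Spec_clean_dockerfile_py (dockerfile : String) (out : String) : Prop := out = clean_dockerfile_py_alt dockerfile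
instance (dockerfile : String) (out : String) : Decidable (Spec_clean_dockerfile_py dockerfile out) := by unfold Spec_clean_dockerfile_py; infer_instance

-- ===== CLAIM (what is proved, stated in full; the proofs are below) =====
def Claim_equal_clean_dockerfile_py : Prop := ∀ (dockerfile : String), Dom_clean_dockerfile_py dockerfile → Spec_clean_dockerfile_py dockerfile (clean_dockerfile_py dockerfile)

-- ===== LEMMAS AND PROOFS =====

-- once the accumulator is nonempty, A's loop just appends every stripped line
theorem pvStripLoop_nonempty (lines : List String) (acc : List String) (h : acc ≠ []) :
    lines.foldl (fun acc line =>
      let l := PySem.Str.strip line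
      if acc = [] ∧ l = "" then acc else acc ++ [l]) acc = acc ++ lines.map PySem.Str.strip := by
  induction lines generalizing acc with
  | nil => simp
  | cons x xs ih =>
    simp only [List.foldl_cons, List.map_cons]
    rw [if_neg (by simp [h])]
    rw [ih _ (by simp)]
    simp

-- A's loop drops exactly the leading blank stripped lines
theorem pvStripLoop_eq (lines : List String) :
    pvStripLoop lines = (lines.map PySem.Str.strip).dropWhile (fun l => l == "") := by
  induction lines with
  | nil => rfl
  | cons x xs ih =>
    simp only [pvStripLoop, List.foldl_cons, List.map_cons, List.dropWhile_cons]
    by_cases hx : PySem.Str.strip x = ""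
    · rw [if_pos ⟨trivial, hx⟩, if_pos (by simp [hx])]
      exact ih
    · rw [if_neg (by simp [hx]), if_neg (by simp [hx])]
      simpa using pvStripLoop_nonempty xs [PySem.Str.strip x] (by simp)

-- A's second scan is a findIdx?-and-drop
theorem pvFindFrom_eq (full rest : List String) (i : Nat) :
    pvFindFrom full rest i =
      match rest.findIdx? (fun l => PySem.Str.startswith l "FROM") with
      | some j => full.drop (i + j)
      | none => full := by
  induction rest generalizing i with
  | nil => simp [pvFindFrom]
  | cons l t ih =>
    rw [pvFindFrom, List.findIdx?_cons]
    by_cases hl : PySem.Str.startswith l "FROM" = true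
    · rw [if_pos hl, if_pos hl]
      simp
    · rw [if_neg hl, if_neg hl, ih (i + 1)]
      cases ht : t.findIdx? (fun l => PySem.Str.startswith l "FROM") with
      | none => simp
      | some j => simp only [Option.map_some]; congr 1; omega

theorem findIdx?_blanks_append (pre post : List String) (pred : String → Bool)
    (h : ∀ x ∈ pre, pred x = false) :
    (pre ++ post).findIdx? pred = (post.findIdx? pred).map (· + pre.length) := by
  induction pre with
  | nil => simp
  | cons a t ih =>
    rw [List.cons_append, List.findIdx?_cons, if_neg (by simp [h a (by simp)])]
    rw [ih (fun x hx => h x (by simp [hx]))]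
    cases post.findIdx? pred
    · simp
    · simp; omega

-- the head of a dropWhile result falsifies the predicate
theorem dropWhile_cons_head_false {α : Type} (p : α → Bool) (l : List α) (h : α) (t : List α)
    (he : l.dropWhile p = h :: t) : p h = false := by
  induction l with
  | nil => simp at he
  | cons a l ih =>
    rw [List.dropWhile_cons] at he
    by_cases ha : p a = true
    · rw [if_pos ha] at he; exact ih he
    · rw [if_neg ha] at he
      cases he; simpa using ha

-- ===== VERDICT (by name: the statement is the Claim_ definition above) =====
theorem clean_dockerfile_py_spec : Claim_equal_clean_dockerfile_py := by
  intro s _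
  unfold Spec_clean_dockerfile_py clean_dockerfile_py clean_dockerfile_py_alt
  by_cases hs : s = ""
  · simp [hs]
  · simp only [hs, if_false]
    set lines := (PySem.Str.split? s "\n").getD [] with hlines
    set stripped := lines.map PySem.Str.strip with hstr
    set P : String → Bool := fun l => PySem.Str.startswith l "FROM" with hP
    set Q : String → Bool := fun l => !(l == "") with hQ
    set pre := stripped.takeWhile (fun l => l == "") with hpre
    set d := stripped.dropWhile (fun l => l == "") with hd
    have hsplit : stripped = pre ++ d := (List.takeWhile_append_dropWhile).symm
    have hcleaned : pvStripLoop lines = d := pvStripLoop_eq _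
    have hpre_blank : ∀ x ∈ pre, x = "" := by
      intro x hx
      have := List.mem_takeWhile_imp hx
      simpa using this
    have hpreP : ∀ x ∈ pre, P x = false := by
      intro x hx; rw [hpre_blank x hx]; decide
    have hpreQ : ∀ x ∈ pre, Q x = false := by
      intro x hx; rw [hpre_blank x hx]; decide
    have hdropPre : stripped.drop pre.length = d := by
      conv_lhs => rw [hsplit]
      exact List.drop_left
    have hfiP : stripped.findIdx? P = (d.findIdx? P).map (· + pre.length) := by
      conv_lhs => rw [hsplit]
      exact findIdx?_blanks_append pre d P hpreP
    have hfiQ : stripped.findIdx? Q = (d.findIdx? Q).map (· + pre.length) := by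
      conv_lhs => rw [hsplit]
      exact findIdx?_blanks_append pre d Q hpreQ
    rw [hcleaned]
    obtain hdd | ⟨h, t, hdd⟩ : d = [] ∨ ∃ h t, d = h :: t := by
      cases d with
      | nil => exact Or.inl rfl
      | cons h t => exact Or.inr ⟨h, t, rfl⟩
    · -- all lines blank (or no lines): both sides join the empty list
      have hPnone : d.findIdx? P = none := by rw [hdd]; rfl
      have hQnone : d.findIdx? Q = none := by rw [hdd]; rfl
      rw [hfiP, hPnone, if_neg (by simp [hdd])]
      simp only [Option.map_none]
      rw [hfiQ, hQnone]
      simp only [Option.map_none, Option.getD_none, List.drop_length, hdd]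
    · have hhead : d.headD "" = h := by rw [hdd]; rfl
      by_cases hPh : P h = true
      · -- first non-blank line already starts with FROM: A leaves cleaned alone
        have hfid : d.findIdx? P = some 0 := by rw [hdd, List.findIdx?_cons, if_pos hPh]
        rw [hfiP, hfid, if_neg (by rw [hhead]; exact fun hc => hc.2 hPh)]
        simp only [Option.map_some, Nat.zero_add]
        rw [hdropPre]
      · -- first non-blank line is not FROM: A enters the search loop
        rw [if_pos ⟨by rw [hdd]; simp, by rw [hhead]; exact hPh⟩, pvFindFrom_eq, ← hP]
        cases hfid : d.findIdx? P with
        | some j =>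
          -- a later FROM line exists: both slice from it
          rw [hfiP, hfid]
          simp only [Option.map_some, Nat.zero_add]
          rw [← hdropPre, List.drop_drop]
          congr 2
          omega
        | none =>
          -- no FROM anywhere: A keeps cleaned, B starts at the first non-blank line
          rw [hfiP, hfid]
          simp only [Option.map_none]
          have hQh : Q h = true := by
            have := dropWhile_cons_head_false (fun l => l == "") stripped h t (hdd ▸ hd.symm)
            simp only [hQ, this, Bool.not_false]
          have hfidQ : d.findIdx? Q = some 0 := by rw [hdd, List.findIdx?_cons, if_pos hQh]
          rw [hfiQ, hfidQ]
          simp only [Option.map_some, Nat.zero_add, Option.getD_some]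
          rw [hdropPre]
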